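-- pv_equiv track=rewrite | github.com/tqtq-Wang/Aximo | compiler/backend/llvm/text.py | _escape_bytes
-- ===== SOURCE A (Python) =====
-- def _escape_bytes(value: str) -> str:
--     parts: list[str] = []
--     for byte in value.encode("utf-8") + b"\x00":
--         if 32 <= byte <= 126 and byte not in {34, 92}:
--             parts.append(chr(byte))
--             continue
--         parts.append(f"\\{byte:02X}")
--     return "".join(parts)
-- ===== SOURCE B (Python) =====
-- def _escape_bytes(value: str) -> str:
--     # Run-based scanner: copy maximal runs of safe printable bytes wholesale,
--     # escape only the byte that breaks a run.
--     data = value.encode("utf-8") + b"\x00"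
--     out = []
--     i = 0
--     n = len(data)
--     while i < n:
--         j = i
--         while j < n and 32 <= data[j] <= 126 and data[j] not in (34, 92):
--             j += 1
--         out.append(data[i:j].decode("ascii"))
--         if j < n:
--             out.append("\\%02X" % data[j])
--             j += 1
--         i = j
--     return "".join(out)
-- ===== Notes on version B (the rewrite author's own statement) =====
-- stated objective: alternative
-- what changed: A maps every byte through a per-byte branch appending one piece per byte; B is a two-level run scanner over the encoded bytes: an outer loop that slices out each maximal run of safe printable bytes wholesale (decoded in one step) and escapes only the single run-breaking byte, so the output is built from runs, not from individual bytes.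
import Mathlib
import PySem

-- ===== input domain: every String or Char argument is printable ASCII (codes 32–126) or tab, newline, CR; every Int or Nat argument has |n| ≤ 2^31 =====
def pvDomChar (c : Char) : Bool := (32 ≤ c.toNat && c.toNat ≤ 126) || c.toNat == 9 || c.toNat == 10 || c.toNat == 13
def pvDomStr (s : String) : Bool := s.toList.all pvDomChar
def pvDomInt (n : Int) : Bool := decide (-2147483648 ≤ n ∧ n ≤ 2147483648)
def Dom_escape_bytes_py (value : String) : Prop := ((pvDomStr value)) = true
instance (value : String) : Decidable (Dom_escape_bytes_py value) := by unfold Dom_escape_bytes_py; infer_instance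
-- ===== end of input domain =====

-- B replaces A's per-byte branch-and-append loop with a run-based scanner: it copies
-- maximal runs of safe printable bytes wholesale and escapes only the run-breaking byte
-- (objective: alternative; same O(n) cost).


-- shared rendering of "\%02X" / f"\{byte:02X}" (two uppercase hex digits after a backslash)
def pvHexDigit (d : Nat) : Char := Char.ofNat (if d < 10 then 48 + d else 55 + d)
def pvHex2 (b : Nat) : List Char := ['\\', pvHexDigit (b / 16), pvHexDigit (b % 16)]

-- ===== PORT A =====
-- value.encode("utf-8") + b"\x00": on the ASCII domain, the UTF-8 bytes are the char codes.
def escape_bytes_py (value : String) : String :=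
  let bytes := value.toList.map (fun (c : Char) => c.toNat) ++ [0]
  let parts := bytes.foldl (fun (parts : List String) byte =>
    if 32 ≤ byte ∧ byte ≤ 126 ∧ ¬(byte = 34 ∨ byte = 92) then
      parts ++ [String.ofList [Char.ofNat byte]]
    else
      parts ++ [String.ofList (pvHex2 byte)]) []
  PySem.Str.join "" parts

-- ===== PORT B =====
-- the inner 'while j < n and <safe>' test of Source B
def pvSafe (b : Nat) : Bool := (32 ≤ b && b ≤ 126) && !(b == 34 || b == 92)

-- Source B's outer while-loop: each iteration consumes one maximal safe run (the inner
-- while scan = takeWhile/dropWhile) plus, if any, the single breaking byte it escapes.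
def pvEscRuns (data : List Nat) : List String :=
  if data = [] then []
  else
    let run := data.takeWhile pvSafe
    match hrest : data.dropWhile pvSafe with
    | [] => [String.ofList (run.map Char.ofNat)]
    | b :: tl =>
        String.ofList (run.map Char.ofNat) :: String.ofList (pvHex2 b) :: pvEscRuns tl
termination_by data.length
decreasing_by
  have h := List.length_dropWhile_le (p := pvSafe) (l := data)
  rw [hrest] at h; simp at h; omega

def escape_bytes_py_alt (value : String) : String :=
  PySem.Str.join "" (pvEscRuns (value.toList.map (fun (c : Char) => c.toNat) ++ [0]))

-- ===== PRECONDITION & SPEC =====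
def Spec_escape_bytes_py (value : String) (out : String) : Prop := out = escape_bytes_py_alt value
instance (value : String) (out : String) : Decidable (Spec_escape_bytes_py value out) := by unfold Spec_escape_bytes_py; infer_instance

-- ===== CLAIM (what is proved, stated in full; the proofs are below) =====
def Claim_equal_escape_bytes_py : Prop := ∀ (value : String), Dom_escape_bytes_py value → Spec_escape_bytes_py value (escape_bytes_py value)

-- ===== LEMMAS AND PROOFS =====

-- A's per-byte rendering, as a chars-level function
def pvRender (b : Nat) : List Char :=
  if 32 ≤ b ∧ b ≤ 126 ∧ ¬(b = 34 ∨ b = 92) then [Char.ofNat b] else pvHex2 b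

theorem pvRender_safe {b : Nat} (h : pvSafe b = true) : pvRender b = [Char.ofNat b] := by
  simp [pvSafe] at h
  rw [pvRender, if_pos]
  omega

theorem pvRender_unsafe {b : Nat} (h : pvSafe b = false) : pvRender b = pvHex2 b := by
  simp [pvSafe] at h
  rw [pvRender, if_neg]
  omega

-- joining with "" is plain concatenation
theorem chars_join_nil_flatten : ∀ (ls : List (List Char)), PySem.Chars.join [] ls = ls.flatten
  | [] => by rw [PySem.Chars.join_nil]; rfl
  | [p] => by rw [PySem.Chars.join_singleton]; simp
  | p :: q :: rest => by
      rw [PySem.Chars.join_cons_cons, chars_join_nil_flatten (q :: rest)]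
      simp

-- a run of safe bytes renders to its chars
theorem render_run (run : List Nat) (h : ∀ b ∈ run, pvSafe b = true) :
    (run.map pvRender).flatten = run.map Char.ofNat := by
  induction run with
  | nil => rfl
  | cons x xs ih =>
    simp only [List.map_cons, List.flatten_cons]
    rw [pvRender_safe (h x (by simp)), ih (fun b hb => h b (by simp [hb]))]
    rfl

-- the first dropped byte fails the scan predicate
theorem dropWhile_head_false {p : Nat → Bool} :
    ∀ {b : Nat} {tl : List Nat} {l : List Nat}, l.dropWhile p = b :: tl → p b = false := by
  intro b tl l h
  induction l with
  | nil => simp [List.dropWhile] at h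
  | cons x xs ih =>
    by_cases hx : p x
    · rw [List.dropWhile_cons_of_pos hx] at h; exact ih h
    · rw [List.dropWhile_cons_of_neg hx] at h
      cases h; simpa using hx

-- the run scanner renders exactly A's per-byte map, concatenated
theorem pvEscRuns_flatten (data : List Nat) :
    ((pvEscRuns data).map String.toList).flatten = (data.map pvRender).flatten := by
  induction data using pvEscRuns.induct with
  | case1 => simp [pvEscRuns]
  | case2 data hne hrest =>
    have hsplit := List.takeWhile_append_dropWhile (p := pvSafe) (l := data)
    rw [hrest, List.append_nil] at hsplit
    rw [pvEscRuns]
    simp only [if_neg hne]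
    rw [hrest]
    conv_rhs => rw [← hsplit]
    rw [render_run _ (fun b hb => List.mem_takeWhile_imp hb)]
    simp
  | case3 data hne b tl hrest ih =>
    have hsplit := List.takeWhile_append_dropWhile (p := pvSafe) (l := data)
    rw [hrest] at hsplit
    rw [pvEscRuns]
    simp only [if_neg hne]
    rw [hrest]
    conv_rhs => rw [← hsplit]
    simp only [List.map_cons, List.flatten_cons, List.map_append, List.flatten_append]
    rw [render_run _ (fun b hb => List.mem_takeWhile_imp hb), ih,
        pvRender_unsafe (dropWhile_head_false hrest)]
    simp

-- ===== VERDICT (by name: the statement is the Claim_ definition above) =====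
theorem escape_bytes_py_spec : Claim_equal_escape_bytes_py := by
  intro value hdom
  unfold Spec_escape_bytes_py escape_bytes_py escape_bytes_py_alt
  have hbody : (fun (parts : List String) byte =>
      if 32 ≤ byte ∧ byte ≤ 126 ∧ ¬(byte = 34 ∨ byte = 92) then
        parts ++ [String.ofList [Char.ofNat byte]]
      else parts ++ [String.ofList (pvHex2 byte)])
      = fun (parts : List String) byte => parts ++ [String.ofList (pvRender byte)] := by
    funext p b
    by_cases hc : 32 ≤ b ∧ b ≤ 126 ∧ ¬(b = 34 ∨ b = 92)
    · rw [if_pos hc, pvRender, if_pos hc]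
    · rw [if_neg hc, pvRender, if_neg hc]
  show PySem.Str.join "" (List.foldl _ [] _) = _
  rw [hbody, PySem.List.foldl_append_singleton_eq_map]
  apply String.ext  -- strings with equal char lists are equal
  rw [PySem.Str.toList_join, PySem.Str.toList_join]
  show PySem.Chars.join [] _ = PySem.Chars.join [] _
  rw [chars_join_nil_flatten, chars_join_nil_flatten, pvEscRuns_flatten]
  simp [Function.comp_def]
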